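-- pv_equiv track=rewrite | github.com/dfinson/agent-tower | backend/services/cost_attribution.py | _count_edit_retries
-- ===== SOURCE A (Python) =====
-- _WRITE_TOOL_CATEGORIES = {"file_write", "git_write"}
--
-- def _count_edit_retries(tool_categories: list[str]) -> int:
--     """Detect edit→shell→edit retry loops in a turn's tool sequence.
--
--     Walks the tool category sequence looking for the pattern:
--     file_write → shell → file_write (agent edited, ran test/build, had to edit again).
--     Each occurrence of this pattern counts as one retry.
--
--     Adapted from CodeBurn's ``countRetries`` (MIT license).
--     """
--     saw_edit = False
--     saw_shell_after_edit = False
--     retries = 0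
--
--     for cat in tool_categories:
--         is_edit = cat in _WRITE_TOOL_CATEGORIES
--         is_shell = cat == "shell"
--
--         if is_edit:
--             if saw_shell_after_edit:
--                 retries += 1
--             saw_edit = True
--             saw_shell_after_edit = False
--         if is_shell and saw_edit:
--             saw_shell_after_edit = True
--
--     return retries
-- ===== SOURCE B (Python) =====
-- _WRITE_TOOL_CATEGORIES = {"file_write", "git_write"}
--
--
-- def _count_edit_retries(tool_categories: list[str]) -> int:
--     """Index-then-gap-scan: collect edit positions, count adjacent pairs
--     whose gap contains a shell invocation."""
--     idxs = [i for i, cat in enumerate(tool_categories)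
--             if cat in _WRITE_TOOL_CATEGORIES]
--     return sum(1 for a, b in zip(idxs, idxs[1:])
--                if "shell" in tool_categories[a + 1:b])
-- ===== Notes on version B (the rewrite author's own statement) =====
-- stated objective: alternative
-- what changed: Replaces A's single-pass two-flag (saw_edit / saw_shell_after_edit) state machine with an index-then-gap-scan decomposition: one pass collects the positions of edit tools, then each adjacent pair of edit positions is counted iff a 'shell' occurs strictly between them.
import Mathlib
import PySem

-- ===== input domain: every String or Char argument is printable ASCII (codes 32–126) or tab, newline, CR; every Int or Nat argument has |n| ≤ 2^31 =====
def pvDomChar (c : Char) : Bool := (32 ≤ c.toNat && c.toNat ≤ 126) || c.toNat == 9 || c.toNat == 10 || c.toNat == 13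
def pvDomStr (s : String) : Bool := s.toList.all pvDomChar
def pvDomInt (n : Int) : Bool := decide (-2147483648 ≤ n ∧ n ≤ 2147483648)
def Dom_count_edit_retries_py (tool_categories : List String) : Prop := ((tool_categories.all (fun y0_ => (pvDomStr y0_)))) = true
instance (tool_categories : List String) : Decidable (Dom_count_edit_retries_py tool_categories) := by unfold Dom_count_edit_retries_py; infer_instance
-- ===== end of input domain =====

-- B replaces A's two-flag state machine by an index-collection + gap-scan decomposition
-- (objective: alternative; same O(n) cost, return values proven identical on all inputs).

-- module constant _WRITE_TOOL_CATEGORIES = {"file_write", "git_write"}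
def pvWriteTools : PySem.Set String := PySem.Set.ofList ["file_write", "git_write"]

-- ===== PORT A =====
def count_edit_retries_py (tool_categories : List String) : Int :=
  (tool_categories.foldl
    (fun (st : Bool × Bool × Int) cat =>
      let sawEdit := st.1
      let sawShellAfterEdit := st.2.1
      let retries := st.2.2
      let isEdit := PySem.Set.contains pvWriteTools cat
      let isShell := cat == "shell"
      let st1 : Bool × Bool × Int :=
        if isEdit then (true, false, if sawShellAfterEdit then retries + 1 else retries)
        else (sawEdit, sawShellAfterEdit, retries)
      if isShell && st1.1 then (st1.1, true, st1.2.2) else st1)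
    (false, false, 0)).2.2

-- ===== PORT B =====
def count_edit_retries_py_alt (tool_categories : List String) : Int :=
  let idxs : List Int :=
    (PySem.List.enumerate tool_categories).filterMap
      (fun p => if PySem.Set.contains pvWriteTools p.2 then some p.1 else none)
  ((idxs.zip (PySem.List.slice idxs (some 1) none)).countP
      (fun p => (PySem.List.slice tool_categories (some (p.1 + 1)) (some p.2)).contains "shell") : Nat)

-- ===== PRECONDITION & SPEC =====
def Spec_count_edit_retries_py (tool_categories : List String) (out : Int) : Prop := out = count_edit_retries_py_alt tool_categories
instance (tool_categories : List String) (out : Int) : Decidable (Spec_count_edit_retries_py tool_categories out) := by unfold Spec_count_edit_retries_py; infer_instance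

-- ===== CLAIM (what is proved, stated in full; the proofs are below) =====
def Claim_equal_count_edit_retries_py : Prop := ∀ (tool_categories : List String), Dom_count_edit_retries_py tool_categories → Spec_count_edit_retries_py tool_categories (count_edit_retries_py tool_categories)

-- ===== LEMMAS AND PROOFS =====

-- abbreviations for the proofs
def pvIsE (c : String) : Bool := PySem.Set.contains pvWriteTools c

def pvStep (st : Bool × Bool × Int) (cat : String) : Bool × Bool × Int :=
  let st1 : Bool × Bool × Int :=
    if PySem.Set.contains pvWriteTools cat then (true, false, if st.2.1 then st.2.2 + 1 else st.2.2)
    else st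
  if (cat == "shell") && st1.1 then (st1.1, true, st1.2.2) else st1

-- edit positions of the list, as naturals, structurally
def pvNatIdxs : List String → List Nat
  | [] => []
  | c :: l => if pvIsE c then 0 :: (pvNatIdxs l).map (· + 1) else (pvNatIdxs l).map (· + 1)

def pvGapP (tc : List String) (p : Nat × Nat) : Bool :=
  ((tc.drop (p.1 + 1)).take (p.2 - (p.1 + 1))).contains "shell"

def pvPcount (tc : List String) (ns : List Nat) : Int :=
  ((ns.zip ns.tail).countP (pvGapP tc) : Nat)

def pvBc (l : List String) : Int := pvPcount l (pvNatIdxs l)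

-- A's fold after the first edit, structurally: s = "shell seen since last edit"
def pvF : Bool → List String → Int
  | _, [] => 0
  | s, c :: l => if pvIsE c then (if s then 1 else 0) + pvF false l else pvF (s || (c == "shell")) l

def pvG : List String → Int
  | [] => 0
  | c :: l => if pvIsE c then pvF false l else pvG l

def pvE (s : Bool) (l : List String) : Int :=
  if l.any pvIsE then
    (if s || (l.takeWhile (fun c => !pvIsE c)).contains "shell" then 1 else 0)
  else 0

theorem pvWriteTools_eq : pvWriteTools = ["file_write", "git_write"] := by rfl

theorem pvIsE_mem {c : String} (h : pvIsE c = true) : c = "file_write" ∨ c = "git_write" := by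
  unfold pvIsE at h
  rw [pvWriteTools_eq] at h
  simp [PySem.Set.contains] at h
  exact h

theorem pvIsE_shell {c : String} (h : pvIsE c = true) : (c == "shell") = false := by
  rcases pvIsE_mem h with h | h <;> subst h <;> decide

theorem pvZip_tail_map {α β : Type} (f : α → β) (ns : List α) :
    ((ns.map f).zip (ns.map f).tail) = (ns.zip ns.tail).map (Prod.map f f) := by
  induction ns with
  | nil => rfl
  | cons a ns ih =>
    cases ns with
    | nil => rfl
    | cons b t =>
      simp only [List.map_cons, List.tail_cons, List.zip_cons_cons, List.map_cons, Prod.map] at *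
      exact congrArg _ ih

theorem pvCountP_shift (c : String) (l : List String) (ns : List Nat) :
    List.countP (pvGapP (c :: l)) ((ns.map (· + 1)).zip (ns.map (· + 1)).tail)
      = List.countP (pvGapP l) (ns.zip ns.tail) := by
  rw [pvZip_tail_map, List.countP_map]
  apply List.countP_congr
  intro p _
  rcases p with ⟨a, b⟩
  simp only [Function.comp, Prod.map, pvGapP, List.drop_succ_cons]
  have : b + 1 - (a + 1 + 1) = b - (a + 1) := by omega
  rw [this]

theorem pvPcount_shift (c : String) (l : List String) (ns : List Nat) :
    pvPcount (c :: l) (ns.map (· + 1)) = pvPcount l ns := by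
  unfold pvPcount
  rw [pvCountP_shift]

theorem pvNatIdxs_nil_iff (l : List String) : pvNatIdxs l = [] ↔ l.any pvIsE = false := by
  induction l with
  | nil => simp [pvNatIdxs]
  | cons c l ih =>
    by_cases h : pvIsE c = true
    · simp [pvNatIdxs, h]
    · simp only [Bool.not_eq_true] at h
      simp [pvNatIdxs, h, ih]

theorem pvNatIdxs_head (l : List String) (h : Nat) (t : List Nat) (hh : pvNatIdxs l = h :: t) :
    l.take h = l.takeWhile (fun c => !pvIsE c) := by
  induction l generalizing h t with
  | nil => exact absurd hh (by simp [pvNatIdxs])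
  | cons c l ih =>
    by_cases hc : pvIsE c = true
    · rw [show pvNatIdxs (c :: l) = 0 :: (pvNatIdxs l).map (· + 1) from by simp [pvNatIdxs, hc]] at hh
      have h0 : h = 0 := by simpa using (congrArg (fun x => x.headD 0) hh).symm
      subst h0
      simp [hc]
    · simp only [Bool.not_eq_true] at hc
      rw [show pvNatIdxs (c :: l) = (pvNatIdxs l).map (· + 1) from by simp [pvNatIdxs, hc]] at hh
      cases hl : pvNatIdxs l with
      | nil => rw [hl] at hh; exact absurd hh (by simp)
      | cons h' t' =>
        rw [hl] at hh
        simp only [List.map_cons, List.cons.injEq] at hh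
        have h1 : h = h' + 1 := hh.1.symm
        subst h1
        rw [List.take_succ_cons, List.takeWhile_cons]
        simp only [hc, Bool.not_false, if_true]
        rw [ih h' t' hl]

theorem pvBc_cons (c : String) (l : List String) :
    pvBc (c :: l) = if pvIsE c then pvE false l + pvBc l else pvBc l := by
  by_cases hc : pvIsE c = true
  · simp only [hc, if_true]
    unfold pvBc
    rw [show pvNatIdxs (c :: l) = 0 :: (pvNatIdxs l).map (· + 1) from by simp [pvNatIdxs, hc]]
    cases hns : pvNatIdxs l with
    | nil =>
      have hany : l.any pvIsE = false := (pvNatIdxs_nil_iff l).mp hns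
      simp [pvPcount, pvE, hany]
    | cons h t =>
      have hany : l.any pvIsE = true := by
        by_contra hco
        simp only [Bool.not_eq_true] at hco
        rw [(pvNatIdxs_nil_iff l).mpr hco] at hns; simp at hns
      have htake : l.take h = l.takeWhile (fun c => !pvIsE c) := pvNatIdxs_head l h t hns
      unfold pvPcount
      simp only [List.map_cons, List.tail_cons, List.zip_cons_cons, List.countP_cons]
      rw [show ((h + 1) :: t.map (· + 1)) = (h :: t).map (· + 1) from by simp,
          show (t.map (· + 1)) = ((h :: t).map (· + 1)).tail from by simp]
      rw [pvCountP_shift c l (h :: t)]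
      have hgap : pvGapP (c :: l) (0, h + 1)
          = (l.takeWhile (fun c => !pvIsE c)).contains "shell" := by
        simp [pvGapP, ← htake]
      simp only [pvE, hany, if_true, Bool.false_or, hgap, List.tail_cons]
      cases hsh : (l.takeWhile (fun c => !pvIsE c)).contains "shell" <;> simp [Int.add_comm]
  · simp only [Bool.not_eq_true] at hc
    simp only [hc, Bool.false_eq_true, if_false]
    unfold pvBc
    rw [show pvNatIdxs (c :: l) = (pvNatIdxs l).map (· + 1) from by simp [pvNatIdxs, hc]]
    exact pvPcount_shift c l (pvNatIdxs l)

theorem pvKey (l : List String) : ∀ s, pvF s l = pvE s l + pvBc l := by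
  induction l with
  | nil => intro s; simp [pvF, pvE, pvBc, pvPcount, pvNatIdxs]
  | cons c l ih =>
    intro s
    by_cases hc : pvIsE c = true
    · have hsh := pvIsE_shell hc
      simp only [pvF, hc, if_true]
      rw [ih false, pvBc_cons]
      simp only [hc, if_true]
      have he : pvE s (c :: l) = if s then 1 else 0 := by
        simp [pvE, List.any_cons, hc]
      rw [he]
    · simp only [Bool.not_eq_true] at hc
      simp only [pvF, hc, Bool.false_eq_true, if_false]
      rw [ih (s || (c == "shell")), pvBc_cons]
      simp only [hc, Bool.false_eq_true, if_false]
      congr 1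
      simp only [pvE, List.any_cons, hc, Bool.false_or, List.takeWhile_cons, Bool.not_false,
        if_true, List.contains_cons, Bool.or_assoc]
      by_cases h : c = "shell"
      · subst h; rfl
      · have h1 : ("shell" == c) = false := by simpa [beq_iff_eq] using (Ne.symm h)
        have h2 : (c == "shell") = false := by simpa [beq_iff_eq] using h
        rw [h1, h2]

theorem pvG_eq_Bc (l : List String) : pvG l = pvBc l := by
  induction l with
  | nil => simp [pvG, pvBc, pvPcount, pvNatIdxs]
  | cons c l ih =>
    by_cases hc : pvIsE c = true
    · simp only [pvG, hc, if_true, pvBc_cons]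
      exact pvKey l false
    · simp only [Bool.not_eq_true] at hc
      simp only [pvG, hc, Bool.false_eq_true, if_false, pvBc_cons, ih]

-- A-side: the fold from the "seen an edit" state computes pvF
theorem pvFoldF (l : List String) : ∀ s r, (l.foldl pvStep (true, s, r)).2.2 = r + pvF s l := by
  induction l with
  | nil => intro s r; simp [pvF]
  | cons c l ih =>
    intro s r
    by_cases hc : PySem.Set.contains pvWriteTools c = true
    · have hE : pvIsE c = true := hc
      have hsh := pvIsE_shell hE
      simp only [List.foldl_cons, pvStep, hc, if_true, hsh, Bool.false_and,
        Bool.false_eq_true, if_false]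
      rw [ih false (if s then r + 1 else r)]
      simp only [pvF, hE, if_true]
      cases s <;> simp only [if_true, if_false, Bool.false_eq_true] <;> ring
    · have hE : pvIsE c = false := by simpa [pvIsE] using hc
      simp only [List.foldl_cons, pvStep, hc, Bool.false_eq_true, if_false]
      by_cases hsh : (c == "shell") = true
      · simp only [hsh, Bool.true_and, if_true]
        rw [ih true r]
        simp [pvF, hE, hsh]
      · simp only [Bool.not_eq_true] at hsh
        simp only [hsh, Bool.false_and, Bool.false_eq_true, if_false]
        rw [ih s r]
        simp [pvF, hE, hsh]

theorem pvFoldG (l : List String) : ∀ r, (l.foldl pvStep (false, false, r)).2.2 = r + pvG l := by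
  induction l with
  | nil => intro r; simp [pvG]
  | cons c l ih =>
    intro r
    by_cases hc : PySem.Set.contains pvWriteTools c = true
    · have hE : pvIsE c = true := hc
      have hsh := pvIsE_shell hE
      simp only [List.foldl_cons, pvStep, hc, if_true, hsh, Bool.false_and,
        Bool.false_eq_true, if_false]
      rw [pvFoldF l false r]
      simp [pvG, hE]
    · have hE : pvIsE c = false := by simpa [pvIsE] using hc
      simp only [List.foldl_cons, pvStep, hc, Bool.false_eq_true, if_false, Bool.and_false]
      rw [ih r]
      simp [pvG, hE]

theorem pvA_eq_G (l : List String) : count_edit_retries_py l = pvG l := by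
  have hfold : count_edit_retries_py l = (l.foldl pvStep (false, false, 0)).2.2 := rfl
  rw [hfold, pvFoldG l 0, zero_add]

-- B-side bridge: the Int-indexed enumerate/filterMap equals pvNatIdxs, cast
theorem pvEnumIdx (l : List String) : ∀ s : Nat,
    (PySem.List.enumerate l (s : Int)).filterMap
      (fun p => if PySem.Set.contains pvWriteTools p.2 then some p.1 else none)
    = (pvNatIdxs l).map (fun k => ((s + k : Nat) : Int)) := by
  induction l with
  | nil => intro s; simp [PySem.List.enumerate_nil, pvNatIdxs]
  | cons c l ih =>
    intro s
    rw [PySem.List.enumerate_cons, List.filterMap_cons]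
    have hrec : ((s : Int) + 1) = ((s + 1 : Nat) : Int) := by push_cast; ring
    by_cases hc : PySem.Set.contains pvWriteTools c = true
    · have hE : pvIsE c = true := hc
      simp only [hc, if_true, hrec, ih (s + 1)]
      rw [show pvNatIdxs (c :: l) = 0 :: (pvNatIdxs l).map (· + 1) from by simp [pvNatIdxs, hE]]
      simp only [List.map_cons, List.map_map, Nat.add_zero]
      congr 1
      apply List.map_congr_left
      intro k _
      simp only [Function.comp]
      push_cast; ring
    · have hE : pvIsE c = false := by simpa [pvIsE] using hc
      simp only [hc, Bool.false_eq_true, if_false, hrec, ih (s + 1)]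
      rw [show pvNatIdxs (c :: l) = (pvNatIdxs l).map (· + 1) from by simp [pvNatIdxs, hE]]
      rw [List.map_map]
      apply List.map_congr_left
      intro k _
      simp only [Function.comp]
      push_cast; ring

theorem pvAlt_eq_Bc (l : List String) : count_edit_retries_py_alt l = pvBc l := by
  have hdef : count_edit_retries_py_alt l =
      ((((PySem.List.enumerate l ((0 : Nat) : Int)).filterMap
          (fun p => if PySem.Set.contains pvWriteTools p.2 then some p.1 else none)).zip
        (PySem.List.slice ((PySem.List.enumerate l ((0 : Nat) : Int)).filterMap
          (fun p => if PySem.Set.contains pvWriteTools p.2 then some p.1 else none)) (some 1) none)).countP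
        (fun p => (PySem.List.slice l (some (p.1 + 1)) (some p.2)).contains "shell") : Nat) := rfl
  rw [hdef, PySem.List.slice_from_one, pvEnumIdx l 0]
  simp only [Nat.zero_add]
  rw [pvZip_tail_map (fun k : Nat => (k : Int)) (pvNatIdxs l), List.countP_map]
  unfold pvBc pvPcount
  congr 1
  apply List.countP_congr
  intro p _
  rcases p with ⟨a, b⟩
  simp only [Function.comp, Prod.map, pvGapP]
  rw [show ((a : Int) + 1) = ((a + 1 : Nat) : Int) from by push_cast; ring]
  rw [PySem.List.slice_natCast]

-- ===== VERDICT (by name: the statement is the Claim_ definition above) =====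
theorem count_edit_retries_py_spec : Claim_equal_count_edit_retries_py := by
  intro l _
  unfold Spec_count_edit_retries_py
  rw [pvA_eq_G, pvG_eq_Bc, ← pvAlt_eq_Bc]
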